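-- pv_equiv track=rewrite | github.com/hholaitan01/structsolve | bs8110.py | select_bars
-- ===== SOURCE A (Python) =====
-- BARS = {
--     "Y8": 50,
--     "Y10": 79,
--     "Y12": 113,
--     "Y16": 201,
--     "Y20": 314,
--     "Y25": 491,
--     "Y32": 804
-- }
--
-- def select_bars(As_req):
--     """
--     Select a practical reinforcement arrangement that
--     satisfies the required steel area As_req.
--
--     Design rules enforced:
--     - Minimum 2 bars in tension
--     - Maximum 6 bars in one layer
--     - Prefer moderate diameters (Y16–Y25)
--     - Discourage very small or very large bars
--     """
--
--     solutions = []
--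
--     for bar, area in BARS.items():
--         dia = int(bar[1:])
--         n = int(-(-As_req // area))   # ceiling
--         As_prov = n * area
--
--         penalty = 0
--
--         # -------------------------------------------------
--         # DETAILING & PRACTICE RULES
--         # -------------------------------------------------
--
--         # Rule 1: No single bar
--         if n < 2:
--             penalty += 10_000
--
--         # Rule 2: Too many bars → congestion
--         if n > 6:
--             penalty += (n - 6) * 1_000
--
--         # Rule 3: Discourage very small bars in beams
--         if dia < 12:
--             penalty += 2_000
--
--         # Rule 4: Discourage very large bars
--         if dia > 25:
--             penalty += 1_000
--
--         # Store solution
--         solutions.append((penalty, dia, bar, n, As_prov))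
--
--     # -------------------------------------------------
--     # SORTING PRIORITY
--     # -------------------------------------------------
--     solutions.sort(
--         key=lambda x: (
--             x[0],              # detailing quality
--             abs(x[3] - 3),     # prefer ~3 bars
--             x[4] - As_req      # minimise excess steel
--         )
--     )
--
--     _, _, bar, n, As_prov = solutions[0]
--     return bar, n, As_prov
-- ===== SOURCE B (Python) =====
-- BARS = {
--     "Y8": 50,
--     "Y10": 79,
--     "Y12": 113,
--     "Y16": 201,
--     "Y20": 314,
--     "Y25": 491,
--     "Y32": 804
-- }
--
-- def select_bars(As_req):
--     # Single pass over BARS keeping the running best (strict '<' so ties keep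
--     # the earlier bar, matching a stable sort's first element).
--     best = None
--     for bar, area in BARS.items():
--         dia = int(bar[1:])
--         n = -(-As_req // area)          # ceiling division
--         As_prov = n * area
--         penalty = ((10_000 if n < 2 else 0)
--                    + ((n - 6) * 1_000 if n > 6 else 0)
--                    + (2_000 if dia < 12 else 0)
--                    + (1_000 if dia > 25 else 0))
--         key = (penalty, abs(n - 3), As_prov - As_req)
--         if best is None or key < best[0]:
--             best = (key, bar, n, As_prov)
--     _, bar, n, As_prov = best
--     return bar, n, As_prov
-- ===== Notes on version B (the rewrite author's own statement) =====
-- stated objective: simpler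
-- what changed: B drops A's solutions list and stable sort, doing a single pass over BARS that keeps a running best under the same (penalty, abs(n-3), excess) key with strict '<' so ties keep the earlier bar, exactly like the stable sort's first element.
import Mathlib
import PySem

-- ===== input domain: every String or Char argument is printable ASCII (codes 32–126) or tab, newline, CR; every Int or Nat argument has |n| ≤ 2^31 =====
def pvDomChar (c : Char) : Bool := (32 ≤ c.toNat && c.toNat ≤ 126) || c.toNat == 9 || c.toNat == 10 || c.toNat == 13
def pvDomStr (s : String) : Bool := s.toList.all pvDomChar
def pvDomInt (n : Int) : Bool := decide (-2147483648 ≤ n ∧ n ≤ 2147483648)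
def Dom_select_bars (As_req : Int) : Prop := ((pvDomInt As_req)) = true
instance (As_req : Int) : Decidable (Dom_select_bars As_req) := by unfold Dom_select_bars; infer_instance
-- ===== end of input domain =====

-- B replaces A's build-all-solutions + stable sort by a single pass over BARS keeping a running
-- best under the same key, with strict '<' so ties keep the earlier bar (objective: simpler).

-- ===== PORT A =====

-- the module constant BARS (a dict, iterated in insertion order)
def pvBars : List (String × Int) :=
  [("Y8", 50), ("Y10", 79), ("Y12", 113), ("Y16", 201), ("Y20", 314), ("Y25", 491), ("Y32", 804)]

-- the body of A's 'for bar, area in BARS.items()' loop: the tuple (penalty, dia, bar, n, As_prov)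
-- appended to 'solutions'.  'int(bar[1:])' via PySem.Int.ofStr?: it never raises on the keys of
-- BARS, so the .getD 0 default is unreachable.
def pvItemA (As_req : Int) (p : String × Int) : Int × Int × String × Int × Int :=
  let bar := p.1
  let area := p.2
  let dia := (PySem.Int.ofStr? (PySem.Str.slice bar (some 1) none)).getD 0
  let n := -(PySem.Int.floordiv (-As_req) area)
  let As_prov := n * area
  let penalty : Int := 0
  let penalty := if n < 2 then penalty + 10000 else penalty
  let penalty := if n > 6 then penalty + (n - 6) * 1000 else penalty
  let penalty := if dia < 12 then penalty + 2000 else penalty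
  let penalty := if dia > 25 then penalty + 1000 else penalty
  (penalty, dia, bar, n, As_prov)

-- A's sort key 'lambda x: (x[0], abs(x[3] - 3), x[4] - As_req)'; the Lex product gives exactly
-- Python's lexicographic tuple order on int triples.
def pvKeyA (As_req : Int) (x : Int × Int × String × Int × Int) : Lex (Int × Lex (Int × Int)) :=
  toLex (x.1, toLex (|x.2.2.2.1 - 3|, x.2.2.2.2 - As_req))

def select_bars (As_req : Int) : String × Int × Int :=
  let solutions := pvBars.foldl (fun acc p => acc ++ [pvItemA As_req p]) []
  let sortedSolutions := PySem.List.sorted solutions (pvKeyA As_req)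
  let s := PySem.List.pyGetD sortedSolutions 0 (0, 0, "", 0, 0)   -- solutions[0]; 7 elements, in range
  (s.2.2.1, s.2.2.2.1, s.2.2.2.2)

-- ===== PORT B =====

-- Python's tuple '<' on triples of ints, hand-ported (exact: lexicographic on Int components)
def pvTupLt (a b : Int × Int × Int) : Bool :=
  a.1 < b.1 || (a.1 == b.1 && (a.2.1 < b.2.1 || (a.2.1 == b.2.1 && a.2.2 < b.2.2)))

-- the body of B's loop: update the running best
def pvStepB (As_req : Int) (best : Option ((Int × Int × Int) × String × Int × Int))
    (p : String × Int) : Option ((Int × Int × Int) × String × Int × Int) :=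
  let bar := p.1
  let area := p.2
  let dia := (PySem.Int.ofStr? (PySem.Str.slice bar (some 1) none)).getD 0
  let n := -(PySem.Int.floordiv (-As_req) area)
  let As_prov := n * area
  let penalty := (if n < 2 then (10000 : Int) else 0) + (if n > 6 then (n - 6) * 1000 else 0)
                 + (if dia < 12 then 2000 else 0) + (if dia > 25 then 1000 else 0)
  let key := (penalty, |n - 3|, As_prov - As_req)
  match best with
  | none => some (key, bar, n, As_prov)
  | some b => if pvTupLt key b.1 then some (key, bar, n, As_prov) else some b

def select_bars_alt (As_req : Int) : String × Int × Int :=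
  match pvBars.foldl (pvStepB As_req) none with
  | some (_, bar, n, As_prov) => (bar, n, As_prov)
  | none => ("", 0, 0)   -- unreachable: BARS is nonempty (Source B would raise on unpacking None)

-- ===== PRECONDITION & SPEC =====
def Spec_select_bars (As_req : Int) (out : String × Int × Int) : Prop := out = select_bars_alt As_req
instance (As_req : Int) (out : String × Int × Int) : Decidable (Spec_select_bars As_req out) := by unfold Spec_select_bars; infer_instance

-- ===== CLAIM (what is proved, stated in full; the proofs are below) =====
def Claim_equal_select_bars : Prop := ∀ (As_req : Int), Dom_select_bars As_req → Spec_select_bars As_req (select_bars As_req)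

-- ===== LEMMAS AND PROOFS =====

-- the int triple A's key maps a solution tuple to (= B's 'key' value)
def pvTrip (As_req : Int) (x : Int × Int × String × Int × Int) : Int × Int × Int :=
  (x.1, |x.2.2.2.1 - 3|, x.2.2.2.2 - As_req)

-- B's state reachable from a solution tuple
def pvPack (As_req : Int) (x : Int × Int × String × Int × Int) :
    (Int × Int × Int) × String × Int × Int :=
  (pvTrip As_req x, x.2.2.1, x.2.2.2.1, x.2.2.2.2)

-- B's penalty expression, pulled out for the A-normalisation lemma
def pvPenalty (n dia : Int) : Int :=
  (if n < 2 then (10000 : Int) else 0) + (if n > 6 then (n - 6) * 1000 else 0)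
    + (if dia < 12 then 2000 else 0) + (if dia > 25 then 1000 else 0)

-- the tail of pvBars, as a literal
def pvRest : List (String × Int) :=
  [("Y10", 79), ("Y12", 113), ("Y16", 201), ("Y20", 314), ("Y25", 491), ("Y32", 804)]

lemma pvBars_cons : pvBars = ("Y8", 50) :: pvRest := rfl

-- A's sequentially accumulated penalty equals B's sum of conditional terms
lemma pvItemA_eq (As_req : Int) (p : String × Int) :
    pvItemA As_req p =
      (pvPenalty (-(PySem.Int.floordiv (-As_req) p.2))
          ((PySem.Int.ofStr? (PySem.Str.slice p.1 (some 1) none)).getD 0),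
        (PySem.Int.ofStr? (PySem.Str.slice p.1 (some 1) none)).getD 0, p.1,
        -(PySem.Int.floordiv (-As_req) p.2),
        -(PySem.Int.floordiv (-As_req) p.2) * p.2) := by
  simp only [pvItemA, pvPenalty]
  split_ifs <;> simp

lemma pvTupLt_eq (As_req : Int) (x y : Int × Int × String × Int × Int) :
    pvTupLt (pvTrip As_req x) (pvTrip As_req y)
      = decide (pvKeyA As_req x < pvKeyA As_req y) := by
  rw [Bool.eq_iff_iff]
  simp only [pvTupLt, pvTrip, pvKeyA, Bool.or_eq_true, Bool.and_eq_true, decide_eq_true_eq,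
    beq_iff_eq, Prod.Lex.lt_iff, ofLex_toLex]

lemma insertBy_nil {α : Type} (bef : α → α → Bool) (x : α) :
    PySem.List.insertBy bef x [] = [x] := by
  simp [PySem.List.insertBy]

lemma head?_insertBy {α : Type} (bef : α → α → Bool) (x a : α) (t : List α) :
    (PySem.List.insertBy bef x (a :: t)).head? = some (if bef x a then x else a) := by
  simp only [PySem.List.insertBy]
  split <;> simp

lemma head?_foldl_insertBy {α : Type} (bef : α → α → Bool) :
    ∀ (xs acc : List α) (a : α), acc.head? = some a →
      (xs.foldl (fun ac x => PySem.List.insertBy bef x ac) acc).head?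
        = some (xs.foldl (fun b x => if bef x b then x else b) a) := by
  intro xs
  induction xs with
  | nil => intro acc a h; simpa using h
  | cons x xs ih =>
      intro acc a h
      cases acc with
      | nil => simp at h
      | cons a' t =>
          simp only [List.head?_cons, Option.some.injEq] at h
          subst h
          simp only [List.foldl_cons]
          exact ih _ _ (head?_insertBy bef x a' t)

lemma pvStepB_none (As_req : Int) (p : String × Int) :
    pvStepB As_req none p = some (pvPack As_req (pvItemA As_req p)) := by
  simp only [pvStepB, pvItemA_eq, pvPack, pvTrip, pvPenalty]

lemma pvStepB_some (As_req : Int) (b : Int × Int × String × Int × Int) (p : String × Int) :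
    pvStepB As_req (some (pvPack As_req b)) p
      = some (pvPack As_req
          (if pvTupLt (pvTrip As_req (pvItemA As_req p)) (pvTrip As_req b)
           then pvItemA As_req p else b)) := by
  cases hc : pvTupLt (pvTrip As_req (pvItemA As_req p)) (pvTrip As_req b) <;>
    simp only [pvItemA_eq, pvPenalty, pvTrip] at hc <;>
    simp only [pvStepB, pvItemA_eq, pvPack, pvTrip, pvPenalty, hc] <;> simp

lemma foldl_pvStepB (As_req : Int) :
    ∀ (xs : List (String × Int)) (b : Int × Int × String × Int × Int),
      xs.foldl (pvStepB As_req) (some (pvPack As_req b))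
        = some (pvPack As_req
            (xs.foldl (fun bb p =>
              if pvTupLt (pvTrip As_req (pvItemA As_req p)) (pvTrip As_req bb)
              then pvItemA As_req p else bb) b)) := by
  intro xs
  induction xs with
  | nil => intro b; rfl
  | cons p xs ih =>
      intro b
      simp only [List.foldl_cons]
      rw [pvStepB_some]
      exact ih _

-- both programs reduce to the same strict-min scan over pvRest
lemma select_bars_eq_scan (As_req : Int) :
    select_bars As_req =
      (let m := pvRest.foldl
          (fun b p => if decide (pvKeyA As_req (pvItemA As_req p) < pvKeyA As_req b)
                      then pvItemA As_req p else b) (pvItemA As_req ("Y8", 50));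
       (m.2.2.1, m.2.2.2.1, m.2.2.2.2)) := by
  simp only [select_bars]
  rw [PySem.List.foldl_append_singleton_eq_map, List.nil_append, pvBars_cons,
    PySem.List.sorted_eq_foldl_insertBy, List.map_cons, List.foldl_cons, insertBy_nil]
  have hA := head?_foldl_insertBy (fun a b => decide (pvKeyA As_req a < pvKeyA As_req b))
    (pvRest.map (pvItemA As_req)) [pvItemA As_req ("Y8", 50)] (pvItemA As_req ("Y8", 50))
    (by simp)
  rcases hfold : (pvRest.map (pvItemA As_req)).foldl
      (fun acc x => PySem.List.insertBy
        (fun a b => decide (pvKeyA As_req a < pvKeyA As_req b)) x acc)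
      [pvItemA As_req ("Y8", 50)] with _ | ⟨hd, tl⟩
  · rw [hfold] at hA; simp at hA
  · rw [hfold] at hA
    simp only [List.head?_cons, Option.some.injEq] at hA
    rw [PySem.List.pyGetD_zero, List.getD_cons_zero, hA, List.foldl_map]

lemma select_bars_alt_eq_scan (As_req : Int) :
    select_bars_alt As_req =
      (let m := pvRest.foldl
          (fun b p => if decide (pvKeyA As_req (pvItemA As_req p) < pvKeyA As_req b)
                      then pvItemA As_req p else b) (pvItemA As_req ("Y8", 50));
       (m.2.2.1, m.2.2.2.1, m.2.2.2.2)) := by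
  unfold select_bars_alt
  rw [pvBars_cons, List.foldl_cons, pvStepB_none, foldl_pvStepB]
  simp only [pvTupLt_eq]
  rfl

-- ===== VERDICT (by name: the statement is the Claim_ definition above) =====
theorem select_bars_spec : Claim_equal_select_bars := by
  unfold Claim_equal_select_bars
  intro As_req _
  unfold Spec_select_bars
  rw [select_bars_eq_scan, select_bars_alt_eq_scan]
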